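-- pv_equiv track=rewrite | github.com/WilliamZimmer/Laboratorio-de-algoritimos-II | semana03/exercicio04.py | maior_sequencia
-- ===== SOURCE A (Python) =====
-- def maior_sequencia(matriz):
--     n = len(matriz)
--     maior = 0
--
--     for i in range(n):
--         for j in range(n - 4):
--             horizontal = vertical = 1
--             for k in range(5):
--                 horizontal *= matriz[i][j + k]
--                 vertical *= matriz[j + k][i]
--             maior = max(maior, horizontal, vertical)
--
--
--     for i in range(n - 4):
--         for j in range(n - 4):
--             diagonal = 1
--             for k in range(5):
--                 diagonal *= matriz[i + k][j + k]
--             maior = max(maior, diagonal)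
--
--     return maior
-- ===== SOURCE B (Python) =====
-- def maior_sequencia(matriz):
--     n = len(matriz)
--     if n < 5:
--         return 0
--     lines = []
--     for i in range(n):
--         lines.append([matriz[i][c] for c in range(n)])
--         lines.append([matriz[r][i] for r in range(n)])
--     for d in range(n - 4):
--         lines.append([matriz[k][d + k] for k in range(n - d)])
--     for d in range(1, n - 4):
--         lines.append([matriz[d + k][k] for k in range(n - d)])
--     maior = 0
--     for line in lines:
--         for s in range(len(line) - 4):
--             p = 1
--             for k in range(5):
--                 p *= line[s + k]
--             maior = max(maior, p)
--     return maior
-- ===== Notes on version B (the rewrite author's own statement) =====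
-- stated objective: alternative
-- what changed: B first extracts every row, every column and every down-right diagonal (length >= 5) as an explicit list of lines, then slides a 5-element product window over each line with a running max, replacing A's three direct double-indexing loop nests.
import Mathlib
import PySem

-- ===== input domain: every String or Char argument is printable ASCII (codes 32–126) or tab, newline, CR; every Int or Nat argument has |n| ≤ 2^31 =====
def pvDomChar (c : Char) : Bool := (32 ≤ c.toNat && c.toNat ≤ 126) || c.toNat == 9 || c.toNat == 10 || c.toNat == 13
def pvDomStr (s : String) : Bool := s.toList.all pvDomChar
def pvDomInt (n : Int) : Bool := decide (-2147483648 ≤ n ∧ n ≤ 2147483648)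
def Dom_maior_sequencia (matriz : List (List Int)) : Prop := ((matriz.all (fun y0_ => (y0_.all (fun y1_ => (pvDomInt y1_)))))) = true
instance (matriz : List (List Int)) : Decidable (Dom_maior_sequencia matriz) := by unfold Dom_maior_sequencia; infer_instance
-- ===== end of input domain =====

-- B replaces A's three direct-indexing loop nests by a build-then-scan decomposition: extract every
-- row, column and down-right diagonal as a line, then slide a 5-window over each line (objective:
-- alternative decomposition, same cost; return-value equivalence only — neither program mutates its input).

-- matriz[i][j] with Python indexing; all indices used are in range under Pre_.
def pyCell (m : List (List Int)) (i j : Int) : Int :=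
  PySem.List.pyGetD (PySem.List.pyGetD m i []) j 0

-- ===== PORT A =====
def maior_sequencia (matriz : List (List Int)) : Int :=
  let n : Int := matriz.length
  let maior : Int :=
    (PySem.List.pyRange 0 n 1).foldl (fun maior i =>
      (PySem.List.pyRange 0 (n - 4) 1).foldl (fun maior j =>
        let hv := (PySem.List.pyRange 0 5 1).foldl
          (fun (hv : Int × Int) k =>
            (hv.1 * pyCell matriz i (j + k), hv.2 * pyCell matriz (j + k) i)) (1, 1)
        max (max maior hv.1) hv.2) maior) 0
  (PySem.List.pyRange 0 (n - 4) 1).foldl (fun maior i =>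
    (PySem.List.pyRange 0 (n - 4) 1).foldl (fun maior j =>
      let diagonal := (PySem.List.pyRange 0 5 1).foldl
        (fun diagonal k => diagonal * pyCell matriz (i + k) (j + k)) 1
      max maior diagonal) maior) maior

-- ===== PORT B =====
def maior_sequencia_alt (matriz : List (List Int)) : Int :=
  let n : Int := matriz.length
  if n < 5 then 0 else
  let lines : List (List Int) :=
    (PySem.List.pyRange 0 n 1).foldl (fun acc i =>
      acc ++ [(PySem.List.pyRange 0 n 1).map (fun c => pyCell matriz i c)]
          ++ [(PySem.List.pyRange 0 n 1).map (fun r => pyCell matriz r i)]) []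
  let lines : List (List Int) :=
    (PySem.List.pyRange 0 (n - 4) 1).foldl (fun acc d =>
      acc ++ [(PySem.List.pyRange 0 (n - d) 1).map (fun k => pyCell matriz k (d + k))]) lines
  let lines : List (List Int) :=
    (PySem.List.pyRange 1 (n - 4) 1).foldl (fun acc d =>
      acc ++ [(PySem.List.pyRange 0 (n - d) 1).map (fun k => pyCell matriz (d + k) k)]) lines
  lines.foldl (fun maior line =>
    (PySem.List.pyRange 0 ((line.length : Int) - 4) 1).foldl (fun maior s =>
      let p := (PySem.List.pyRange 0 5 1).foldl
        (fun p k => p * PySem.List.pyGetD line (s + k) 0) 1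
      max maior p) maior) 0

-- ===== PRECONDITION & SPEC =====
-- Pre_ excludes exactly the inputs on which Python A raises IndexError: a matrix with at least
-- 5 rows some of whose rows are shorter than the number of rows (A reads a full n×n square).
def Pre_maior_sequencia (matriz : List (List Int)) : Prop :=
  (Nat.blt matriz.length 5 || matriz.all (fun row => Nat.ble matriz.length row.length)) = true
instance (matriz : List (List Int)) : Decidable (Pre_maior_sequencia matriz) := by
  unfold Pre_maior_sequencia; infer_instance

def pvWitness_maior_sequencia : List (List Int) :=
  [[1, 2, 3, 4, 5], [2, 2, 2, 2, 2], [0, -1, 3, 1, 4], [5, 5, 1, 1, 1], [1, 2, 1, 2, 1]]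

def Spec_maior_sequencia (matriz : List (List Int)) (out : Int) : Prop := out = maior_sequencia_alt matriz
instance (matriz : List (List Int)) (out : Int) : Decidable (Spec_maior_sequencia matriz out) := by unfold Spec_maior_sequencia; infer_instance

-- ===== CLAIM (what is proved, stated in full; the proofs are below) =====
def Claim_equal_maior_sequencia : Prop := ∀ (matriz : List (List Int)), Dom_maior_sequencia matriz → Pre_maior_sequencia matriz → Spec_maior_sequencia matriz (maior_sequencia matriz)

-- ===== LEMMAS AND PROOFS =====

-- the three window products, as they appear after reducing the inner k-loops
def wH (m : List (List Int)) (i j : Int) : Int :=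
  pyCell m i j * pyCell m i (j + 1) * pyCell m i (j + 2) * pyCell m i (j + 3) * pyCell m i (j + 4)
def wV (m : List (List Int)) (i j : Int) : Int :=
  pyCell m j i * pyCell m (j + 1) i * pyCell m (j + 2) i * pyCell m (j + 3) i * pyCell m (j + 4) i
def wD (m : List (List Int)) (i j : Int) : Int :=
  pyCell m i j * pyCell m (i + 1) (j + 1) * pyCell m (i + 2) (j + 2) * pyCell m (i + 3) (j + 3) *
    pyCell m (i + 4) (j + 4)

-- all window products A inspects, in A's order
def listA (m : List (List Int)) : List Int :=
  let n : Int := m.length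
  (PySem.List.pyRange 0 n 1).flatMap (fun i =>
    (PySem.List.pyRange 0 (n - 4) 1).flatMap (fun j => [wH m i j, wV m i j])) ++
  (PySem.List.pyRange 0 (n - 4) 1).flatMap (fun i =>
    (PySem.List.pyRange 0 (n - 4) 1).map (fun j => wD m i j))

-- all window products B inspects, in B's order
def listB (m : List (List Int)) : List Int :=
  let n : Int := m.length
  (PySem.List.pyRange 0 n 1).flatMap (fun i =>
    (PySem.List.pyRange 0 (n - 4) 1).map (fun s => wH m i s) ++
    (PySem.List.pyRange 0 (n - 4) 1).map (fun s => wV m i s)) ++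
  (PySem.List.pyRange 0 (n - 4) 1).flatMap (fun d =>
    (PySem.List.pyRange 0 (n - d - 4) 1).map (fun s => wD m s (d + s))) ++
  (PySem.List.pyRange 1 (n - 4) 1).flatMap (fun d =>
    (PySem.List.pyRange 0 (n - d - 4) 1).map (fun s => wD m (d + s) s))

-- running max over a list: fold equality follows from having the same members
theorem foldl_max_eq_of_mem_iff (l₁ l₂ : List Int) (a : Int) (h : ∀ x, x ∈ l₁ ↔ x ∈ l₂) :
    l₁.foldl max a = l₂.foldl max a := by
  apply le_antisymm
  · rcases PySem.List.foldl_max_mem l₁ a with h1 | h1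
    · rw [h1]; exact (PySem.List.le_foldl_max l₂ a).1
    · exact (PySem.List.le_foldl_max l₂ a).2 _ ((h _).1 h1)
  · rcases PySem.List.foldl_max_mem l₂ a with h1 | h1
    · rw [h1]; exact (PySem.List.le_foldl_max l₁ a).1
    · exact (PySem.List.le_foldl_max l₁ a).2 _ ((h _).2 h1)

theorem A_eq_listA (m : List (List Int)) : maior_sequencia m = (listA m).foldl max 0 := by
  have h5 : PySem.List.pyRange 0 5 1 = [0, 1, 2, 3, 4] := by decide
  unfold maior_sequencia listA
  simp only [List.foldl_append, List.foldl_flatMap, List.foldl_map, h5, List.foldl,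
    wH, wV, wD, one_mul, add_zero]

-- the list of 5-window products of a line, as B's window pass computes it
def winF (line : List Int) : List Int :=
  (PySem.List.pyRange 0 ((line.length : Int) - 4) 1).map (fun s =>
    1 * PySem.List.pyGetD line (s + 0) 0 * PySem.List.pyGetD line (s + 1) 0 *
      PySem.List.pyGetD line (s + 2) 0 * PySem.List.pyGetD line (s + 3) 0 *
      PySem.List.pyGetD line (s + 4) 0)

theorem winF_map {f : Int → Int} {N : Int} (hN : 0 ≤ N) :
    winF ((PySem.List.pyRange 0 N 1).map f) =
      (PySem.List.pyRange 0 (N - 4) 1).map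
        (fun s => f s * f (s + 1) * f (s + 2) * f (s + 3) * f (s + 4)) := by
  unfold winF
  simp only [List.length_map, PySem.List.length_pyRange_one, sub_zero, Int.toNat_of_nonneg hN]
  apply List.map_congr_left
  intro s hs
  rw [PySem.List.mem_pyRange_one] at hs
  rw [PySem.List.pyGetD_map_pyRange_of_nonneg _ _ _ _ (by omega) (by omega),
      PySem.List.pyGetD_map_pyRange_of_nonneg _ _ _ _ (by omega) (by omega),
      PySem.List.pyGetD_map_pyRange_of_nonneg _ _ _ _ (by omega) (by omega),
      PySem.List.pyGetD_map_pyRange_of_nonneg _ _ _ _ (by omega) (by omega),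
      PySem.List.pyGetD_map_pyRange_of_nonneg _ _ _ _ (by omega) (by omega)]
  simp [add_zero, one_mul]

theorem B_eq_listB (m : List (List Int)) : maior_sequencia_alt m = (listB m).foldl max 0 := by
  have h5 : PySem.List.pyRange 0 5 1 = [0, 1, 2, 3, 4] := by decide
  have hn0 : (0 : Int) ≤ (m.length : Int) := Int.natCast_nonneg _
  by_cases hsmall : (m.length : Int) < 5
  · -- fewer than 5 rows: no line has a 5-window, every range in listB is empty
    have hnil : PySem.List.pyRange 0 ((m.length : Int) - 4) 1 = [] :=
      PySem.List.pyRange_one_eq_nil (by omega)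
    have hnil1 : PySem.List.pyRange 1 ((m.length : Int) - 4) 1 = [] :=
      PySem.List.pyRange_one_eq_nil (by omega)
    unfold maior_sequencia_alt listB
    simp [hsmall, hnil, hnil1]
    have hfm : (PySem.List.pyRange 0 ((m.length : Int)) 1).flatMap (fun _ : Int => ([] : List Int)) = [] :=
      List.flatMap_eq_nil_iff.mpr (by simp)
    rw [hfm]
    rfl
  unfold maior_sequencia_alt listB
  simp only [hsmall, if_false]
  -- the three line-building loops produce rows/cols, then the two diagonal families
  simp only [List.append_assoc, PySem.List.foldl_append_eq_flatMap, List.nil_append]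
  -- the window pass is a running max over the window products of every line
  simp only [h5, List.foldl]
  have hwin : ∀ (lines : List (List Int)),
      lines.foldl (fun maior line =>
        (PySem.List.pyRange 0 ((line.length : Int) - 4) 1).foldl (fun maior s =>
          max maior (1 * PySem.List.pyGetD line (s + 0) 0 * PySem.List.pyGetD line (s + 1) 0 *
            PySem.List.pyGetD line (s + 2) 0 * PySem.List.pyGetD line (s + 3) 0 *
            PySem.List.pyGetD line (s + 4) 0)) maior) 0
      = (lines.flatMap winF).foldl max 0 := by
    intro lines
    simp only [List.foldl_flatMap, winF, List.foldl_map]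
  rw [hwin]
  -- distribute the window pass over the three chunks of lines
  simp only [List.flatMap_append, List.flatMap_assoc, List.flatMap_cons, List.flatMap_nil,
    List.append_nil, List.foldl_append]
  -- rows and columns
  have hRC : (PySem.List.pyRange 0 ((m.length : Int)) 1).flatMap (fun i =>
        winF ((PySem.List.pyRange 0 ((m.length : Int)) 1).map (fun c => pyCell m i c)) ++
        winF ((PySem.List.pyRange 0 ((m.length : Int)) 1).map (fun r => pyCell m r i))) =
      (PySem.List.pyRange 0 ((m.length : Int)) 1).flatMap (fun i =>
        (PySem.List.pyRange 0 ((m.length : Int) - 4) 1).map (fun s => wH m i s) ++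
        (PySem.List.pyRange 0 ((m.length : Int) - 4) 1).map (fun s => wV m i s)) :=
    List.flatMap_congr (by intro i _; rw [winF_map hn0, winF_map hn0]; simp [wH, wV])
  have hD1 : (PySem.List.pyRange 0 ((m.length : Int) - 4) 1).flatMap (fun d =>
        winF ((PySem.List.pyRange 0 ((m.length : Int) - d) 1).map (fun k => pyCell m k (d + k)))) =
      (PySem.List.pyRange 0 ((m.length : Int) - 4) 1).flatMap (fun d =>
        (PySem.List.pyRange 0 ((m.length : Int) - d - 4) 1).map (fun s => wD m s (d + s))) := by
    apply List.flatMap_congr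
    intro d hd
    rw [PySem.List.mem_pyRange_one] at hd
    rw [winF_map (by omega)]
    simp [wD, add_assoc]
  have hD2 : (PySem.List.pyRange 1 ((m.length : Int) - 4) 1).flatMap (fun d =>
        winF ((PySem.List.pyRange 0 ((m.length : Int) - d) 1).map (fun k => pyCell m (d + k) k))) =
      (PySem.List.pyRange 1 ((m.length : Int) - 4) 1).flatMap (fun d =>
        (PySem.List.pyRange 0 ((m.length : Int) - d - 4) 1).map (fun s => wD m (d + s) s)) := by
    apply List.flatMap_congr
    intro d hd
    rw [PySem.List.mem_pyRange_one] at hd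
    rw [winF_map (by omega)]
    simp [wD, add_assoc]
  rw [hRC, hD1, hD2]

theorem mem_listA_iff_mem_listB (m : List (List Int)) (x : Int) : x ∈ listA m ↔ x ∈ listB m := by
  unfold listA listB
  simp only [List.mem_append, List.mem_flatMap, List.mem_map, List.mem_cons,
    List.not_mem_nil, or_false, PySem.List.mem_pyRange_one]
  constructor
  · rintro (⟨i, hi, j, hj, hx | hx⟩ | ⟨i, hi, j, hj, hx⟩)
    · exact Or.inl (Or.inl ⟨i, hi, Or.inl ⟨j, hj, hx.symm⟩⟩)
    · exact Or.inl (Or.inl ⟨i, hi, Or.inr ⟨j, hj, hx.symm⟩⟩)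
    · by_cases hij : i ≤ j
      · refine Or.inl (Or.inr ⟨j - i, by omega, i, by omega, ?_⟩)
        have e : j - i + i = j := by omega
        rw [e]; exact hx
      · refine Or.inr ⟨i - j, by omega, j, by omega, ?_⟩
        have e : i - j + j = i := by omega
        rw [e]; exact hx
  · rintro ((⟨i, hi, ⟨j, hj, hx⟩ | ⟨j, hj, hx⟩⟩ | ⟨d, hd, s, hs, hx⟩) | ⟨d, hd, s, hs, hx⟩)
    · exact Or.inl ⟨i, hi, j, hj, Or.inl hx.symm⟩
    · exact Or.inl ⟨i, hi, j, hj, Or.inr hx.symm⟩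
    · exact Or.inr ⟨s, by omega, d + s, by omega, hx⟩
    · exact Or.inr ⟨d + s, by omega, s, by omega, hx⟩

-- ===== VERDICT (by name: the statement is the Claim_ definition above) =====
theorem maior_sequencia_spec : Claim_equal_maior_sequencia := by
  intro m _ _
  unfold Spec_maior_sequencia
  rw [A_eq_listA, B_eq_listB]
  exact foldl_max_eq_of_mem_iff _ _ _ (mem_listA_iff_mem_listB m)
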